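-- pv_equiv track=rewrite | github.com/tomiyee/tetris-python | models/tombot/main.py | get_min_height
-- ===== SOURCE A (Python) =====
-- def get_min_height(board):
--     """ Returns the minimum height """
--     # dimensions of the board
--     rows = len(board)
--     cols = len(board[0])
--     heights = []
--     for c in range(cols):
--         col = [board[r][c] for r in range(rows)]
--         if 1 not in col:
--             heights.append(0)
--             continue
--         heights.append(rows - col.index(1))
--     return min(heights)
-- ===== SOURCE B (Python) =====
-- def get_min_height(board):
--     """ Returns the minimum height """
--     rows = len(board)
--     cols = len(board[0])
--     # row-major single sweep: per column keep (height, found); the first 1 seen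
--     # from the top fixes that column's height at rows - r.
--     state = [(0, False)] * cols
--     for r, row in enumerate(board):
--         state = [(rows - r, True) if x == 1 and not f else (h, f)
--                  for x, (h, f) in zip(row, state)]
--     return min(h for h, f in state)
-- ===== Notes on version B (the rewrite author's own statement) =====
-- stated objective: alternative
-- what changed: Replaces A's column-by-column pass (rebuild each column as a list, test membership, call .index) with a single row-major sweep over the board that fixes each column's height at the first 1 seen from the top, maintaining a per-column (height, found) state.
import Mathlib
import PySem

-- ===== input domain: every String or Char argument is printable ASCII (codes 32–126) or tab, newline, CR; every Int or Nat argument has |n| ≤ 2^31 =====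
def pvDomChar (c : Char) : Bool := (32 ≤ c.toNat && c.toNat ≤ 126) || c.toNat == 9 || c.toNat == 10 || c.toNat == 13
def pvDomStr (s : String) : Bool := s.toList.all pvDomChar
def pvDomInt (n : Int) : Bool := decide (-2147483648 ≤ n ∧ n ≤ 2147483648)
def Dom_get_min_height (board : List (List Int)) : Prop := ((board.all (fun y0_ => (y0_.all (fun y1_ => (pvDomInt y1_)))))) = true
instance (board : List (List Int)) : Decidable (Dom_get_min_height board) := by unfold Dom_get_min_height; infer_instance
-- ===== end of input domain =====

-- B replaces A's column-by-column rebuild (build each column, test membership, call .index)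
-- by a single row-major sweep that fixes each column's height at the first 1 seen from the top
-- (objective: alternative decomposition, same asymptotic cost). Return-value equivalence only.

-- ===== PORT A =====
def get_min_height (board : List (List Int)) : Int :=
  let rows := board.length
  let cols := ((PySem.List.pyGet? board 0).getD []).length
  let heights := (PySem.List.pyRange 0 (cols : Int) 1).foldl (fun heights c =>
    let col := (PySem.List.pyRange 0 (rows : Int) 1).map (fun r =>
      PySem.List.pyGetD (PySem.List.pyGetD board r []) c 0)
    if ¬ ((1 : Int) ∈ col) then heights ++ [(0 : Int)]
    else heights ++ [(rows : Int) - (((PySem.List.index? col (1 : Int)).getD 0 : Nat) : Int)]) []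
  (PySem.List.min? heights (fun x => x)).getD 0

-- ===== PORT B =====
-- the body of Source B's per-row list comprehension (zip of the row with the (height, found) states)
def pvStepRow (rows : Int) (state : List (Int × Bool)) (rr : Int × List Int) : List (Int × Bool) :=
  List.zipWith (fun x hf => if x == (1 : Int) && !hf.2 then (rows - rr.1, true) else hf) rr.2 state

def get_min_height_alt (board : List (List Int)) : Int :=
  let rows := board.length
  let cols := ((PySem.List.pyGet? board 0).getD []).length
  let state := (PySem.List.enumerate board 0).foldl (pvStepRow (rows : Int))
    (List.replicate cols ((0 : Int), false))
  (PySem.List.min? (state.map (fun hf => hf.1)) (fun x => x)).getD 0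

-- ===== PRECONDITION & SPEC =====
-- Pre_ excludes exactly the inputs on which A raises: the empty board and an empty first row
-- (board[0] IndexError / min([]) ValueError), and ragged boards where some row is shorter than
-- board[0] (board[r][c] IndexError).
def Pre_get_min_height (board : List (List Int)) : Prop :=
  board ≠ [] ∧ (board.headD []).length ≠ 0 ∧ ∀ row ∈ board, (board.headD []).length ≤ row.length
instance (board : List (List Int)) : Decidable (Pre_get_min_height board) := by
  unfold Pre_get_min_height; infer_instance
def pvWitness_get_min_height : List (List Int) := [[0, 1], [1, 0]]

def Spec_get_min_height (board : List (List Int)) (out : Int) : Prop := out = get_min_height_alt board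
instance (board : List (List Int)) (out : Int) : Decidable (Spec_get_min_height board out) := by
  unfold Spec_get_min_height; infer_instance

-- ===== CLAIM (what is proved, stated in full; the proofs are below) =====
def Claim_equal_get_min_height : Prop := ∀ (board : List (List Int)), Dom_get_min_height board → Pre_get_min_height board → Spec_get_min_height board (get_min_height board)

-- ===== LEMMAS AND PROOFS =====

-- the fate of one column under B's sweep: fold of that column's entries with a start index
def pvColFold (rows : Int) (xs : List Int) (s : Int) (p : Int × Bool) : Int × Bool :=
  (PySem.List.enumerate xs s).foldl
    (fun p ix => if ix.2 == (1 : Int) && !p.2 then (rows - ix.1, true) else p) p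

theorem pvColFold_found (rows : Int) (xs : List Int) (s : Int) (p : Int × Bool)
    (h : p.2 = true) : pvColFold rows xs s p = p := by
  induction xs generalizing s with
  | nil => simp [pvColFold, PySem.List.enumerate_nil]
  | cons x t ih =>
    simp only [pvColFold, PySem.List.enumerate_cons, List.foldl_cons, h]
    simpa [pvColFold] using ih (s + 1)

theorem pvColFold_spec (rows : Int) (xs : List Int) (s : Int) :
    pvColFold rows xs s (0, false) =
      match PySem.List.index? xs (1 : Int) with
      | none => ((0 : Int), false)
      | some k => (rows - (s + (k : Int)), true) := by
  induction xs generalizing s with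
  | nil => simp [pvColFold, PySem.List.enumerate_nil, PySem.List.index?]
  | cons x t ih =>
    by_cases hx : x = 1
    · subst hx
      have h1 : pvColFold rows (1 :: t) s ((0 : Int), false) =
          pvColFold rows t (s + 1) (rows - s, true) := by
        simp [pvColFold, PySem.List.enumerate_cons]
      rw [h1, pvColFold_found rows t (s + 1) _ rfl, PySem.List.index?_cons_self]
      simp
    · have h1 : pvColFold rows (x :: t) s ((0 : Int), false) =
          pvColFold rows t (s + 1) ((0 : Int), false) := by
        simp [pvColFold, PySem.List.enumerate_cons, hx]
      rw [h1, ih (s + 1), PySem.List.index?_cons_of_ne t hx]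
      cases h : PySem.List.index? t (1 : Int) with
      | none => simp
      | some k => simp; ring

theorem pvStepRow_length (rows : Int) (st : List (Int × Bool)) (rr : Int × List Int)
    (h : st.length ≤ rr.2.length) : (pvStepRow rows st rr).length = st.length := by
  simp [pvStepRow]; omega

theorem pvBfold_length (rows : Int) (bs : List (List Int)) (s : Int) (st : List (Int × Bool))
    (hr : ∀ row ∈ bs, st.length ≤ row.length) :
    ((PySem.List.enumerate bs s).foldl (pvStepRow rows) st).length = st.length := by
  induction bs generalizing s st with
  | nil => simp [PySem.List.enumerate_nil]
  | cons row bs ih =>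
    simp only [PySem.List.enumerate_cons, List.foldl_cons]
    have hlen : (pvStepRow rows st (s, row)).length = st.length :=
      pvStepRow_length rows st (s, row) (hr row (by simp))
    rw [ih (s + 1) _ (by rw [hlen]; exact fun r hrm => hr r (by simp [hrm]))]
    exact hlen

theorem pvBfold_get (rows : Int) (bs : List (List Int)) (s : Int) (st : List (Int × Bool))
    (hr : ∀ row ∈ bs, st.length ≤ row.length) (c : Nat) (hc : c < st.length) :
    ((PySem.List.enumerate bs s).foldl (pvStepRow rows) st)[c]? =
      some (pvColFold rows (bs.map (fun row => row.getD c 0)) s (st.getD c ((0 : Int), false))) := by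
  induction bs generalizing s st with
  | nil =>
    simp [PySem.List.enumerate_nil, pvColFold, List.getD,
      List.getElem?_eq_getElem hc]
  | cons row bs ih =>
    simp only [PySem.List.enumerate_cons, List.foldl_cons]
    have hrow : st.length ≤ row.length := hr row (by simp)
    have hlen : (pvStepRow rows st (s, row)).length = st.length :=
      pvStepRow_length rows st (s, row) hrow
    have hstep : (pvStepRow rows st (s, row)).getD c ((0 : Int), false) =
        (if row.getD c 0 == (1 : Int) && !(st.getD c ((0 : Int), false)).2
         then (rows - s, true) else st.getD c ((0 : Int), false)) := by
      have hcr : c < row.length := by omega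
      simp [pvStepRow, List.getD_eq_getElem?_getD, List.getElem?_zipWith,
        List.getElem?_eq_getElem hc, List.getElem?_eq_getElem hcr]
    rw [ih (s + 1) _ (by rw [hlen]; exact fun r hrm => hr r (by simp [hrm])) (by omega)]
    rw [hstep]
    have hcr : c < row.length := by omega
    have hrowc : (row :: bs).map (fun row => row.getD c 0) =
        row.getD c 0 :: bs.map (fun row => row.getD c 0) := by simp
    rw [hrowc]
    simp only [pvColFold, PySem.List.enumerate_cons, List.foldl_cons]

theorem pv_heights_eq (board : List (List Int)) (h : Pre_get_min_height board) :
    ((PySem.List.pyRange 0 ((((PySem.List.pyGet? board 0).getD []).length : Int)) 1).foldl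
      (fun heights c =>
        let col := (PySem.List.pyRange 0 ((board.length : Int)) 1).map (fun r =>
          PySem.List.pyGetD (PySem.List.pyGetD board r []) c 0)
        if ¬ ((1 : Int) ∈ col) then heights ++ [(0 : Int)]
        else heights ++ [((board.length : Int)) -
          (((PySem.List.index? col (1 : Int)).getD 0 : Nat) : Int)]) []) =
    (((PySem.List.enumerate board 0).foldl (pvStepRow ((board.length : Int)))
      (List.replicate ((PySem.List.pyGet? board 0).getD []).length ((0 : Int), false))).map
        (fun hf => hf.1)) := by
  obtain ⟨hne, hc0, hrows⟩ := h
  obtain ⟨b0, bt, rfl⟩ : ∃ b0 bt, board = b0 :: bt := by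
    cases board with
    | nil => exact absurd rfl hne
    | cons b0 bt => exact ⟨b0, bt, rfl⟩
  have hget0 : (PySem.List.pyGet? (b0 :: bt) 0).getD [] = b0 := by
    simp
  rw [hget0]
  simp only [List.headD_cons] at hc0 hrows
  -- A's loop is an append-of-singleton fold, hence a map over range(cols)
  have hA : (PySem.List.pyRange 0 ((b0.length : Nat) : Int) 1).foldl
      (fun heights c =>
        let col := (PySem.List.pyRange 0 (((b0 :: bt).length : Nat) : Int) 1).map (fun r =>
          PySem.List.pyGetD (PySem.List.pyGetD (b0 :: bt) r []) c 0)
        if ¬ ((1 : Int) ∈ col) then heights ++ [(0 : Int)]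
        else heights ++ [(((b0 :: bt).length : Nat) : Int) -
          (((PySem.List.index? col (1 : Int)).getD 0 : Nat) : Int)]) [] =
      (PySem.List.pyRange 0 ((b0.length : Nat) : Int) 1).map (fun c =>
        let col := (PySem.List.pyRange 0 (((b0 :: bt).length : Nat) : Int) 1).map (fun r =>
          PySem.List.pyGetD (PySem.List.pyGetD (b0 :: bt) r []) c 0)
        if ¬ ((1 : Int) ∈ col) then (0 : Int)
        else (((b0 :: bt).length : Nat) : Int) -
          (((PySem.List.index? col (1 : Int)).getD 0 : Nat) : Int)) := by
    have hfun : (fun (heights : List Int) (c : Int) =>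
        let col := (PySem.List.pyRange 0 (((b0 :: bt).length : Nat) : Int) 1).map (fun r =>
          PySem.List.pyGetD (PySem.List.pyGetD (b0 :: bt) r []) c 0)
        if ¬ ((1 : Int) ∈ col) then heights ++ [(0 : Int)]
        else heights ++ [(((b0 :: bt).length : Nat) : Int) -
          (((PySem.List.index? col (1 : Int)).getD 0 : Nat) : Int)]) =
        (fun heights c => heights ++ [(fun c =>
          let col := (PySem.List.pyRange 0 (((b0 :: bt).length : Nat) : Int) 1).map (fun r =>
            PySem.List.pyGetD (PySem.List.pyGetD (b0 :: bt) r []) c 0)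
          if ¬ ((1 : Int) ∈ col) then (0 : Int)
          else (((b0 :: bt).length : Nat) : Int) -
            (((PySem.List.index? col (1 : Int)).getD 0 : Nat) : Int)) c]) := by
      have key : ∀ (P : Prop) [Decidable P] (a b : Int) (h : List Int),
          (if P then h ++ [a] else h ++ [b]) = h ++ [if P then a else b] := by
        intro P _ a b h; split <;> rfl
      funext heights c
      exact key _ _ _ _
    rw [hfun, PySem.List.foldl_append_singleton_eq_map]
    simp
  rw [hA]
  -- the column list A builds for column c is the board's c-th column
  have hcol : ∀ (c : Nat), (PySem.List.pyRange 0 (((b0 :: bt).length : Nat) : Int) 1).map (fun r =>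
      PySem.List.pyGetD (PySem.List.pyGetD (b0 :: bt) r []) ((c : Nat) : Int) 0) =
      (b0 :: bt).map (fun row => row.getD c 0) := by
    intro c
    have h1 : (PySem.List.pyRange 0 (((b0 :: bt).length : Nat) : Int) 1).map (fun r =>
        PySem.List.pyGetD (PySem.List.pyGetD (b0 :: bt) r []) ((c : Nat) : Int) 0) =
        ((PySem.List.pyRange 0 (((b0 :: bt).length : Nat) : Int) 1).map (fun r =>
          PySem.List.pyGetD (b0 :: bt) r [])).map (fun row => PySem.List.pyGetD row ((c : Nat) : Int) 0) := by
      simp only [List.map_map, Function.comp_def]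
    rw [h1]
    have h2 : (PySem.List.pyRange 0 (((b0 :: bt).length : Nat) : Int) 1).map
        (fun r => PySem.List.pyGetD (b0 :: bt) r []) = (b0 :: bt) := by
      have := PySem.List.map_pyGetD_pyRange_zero (b0 :: bt) ([] : List Int)
      simpa [PySem.List.len] using this
    rw [h2]
    simp [PySem.List.pyGetD_natCast]
  -- both sides pointwise
  have hrowlen : ∀ row ∈ (b0 :: bt), b0.length ≤ row.length := hrows
  have hlenB : ((PySem.List.enumerate (b0 :: bt) 0).foldl (pvStepRow (((b0 :: bt).length : Nat) : Int))
      (List.replicate b0.length ((0 : Int), false))).length = b0.length := by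
    have := pvBfold_length (((b0 :: bt).length : Nat) : Int) (b0 :: bt) 0
      (List.replicate b0.length ((0 : Int), false))
      (by intro row hrm; rw [List.length_replicate]; exact hrowlen row hrm)
    simpa using this
  have hrange : PySem.List.pyRange 0 ((b0.length : Nat) : Int) 1 =
      (List.range b0.length).map (fun k => ((k : Nat) : Int)) :=
    PySem.List.pyRange_zero_natCast b0.length
  apply List.ext_getElem?
  intro c
  by_cases hc : c < b0.length
  · have hBc := pvBfold_get (((b0 :: bt).length : Nat) : Int) (b0 :: bt) 0
      (List.replicate b0.length ((0 : Int), false))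
      (by intro row hrm; rw [List.length_replicate]; exact hrowlen row hrm) c
      (by rwa [List.length_replicate])
    have hrep : (List.replicate b0.length ((0 : Int), false)).getD c ((0 : Int), false) =
        ((0 : Int), false) := by
      simp [List.getD_eq_getElem?_getD, hc]
    rw [hrep] at hBc
    have hBmap : (((PySem.List.enumerate (b0 :: bt) 0).foldl (pvStepRow (((b0 :: bt).length : Nat) : Int))
        (List.replicate b0.length ((0 : Int), false))).map (fun hf => hf.1))[c]? =
        some ((pvColFold (((b0 :: bt).length : Nat) : Int)
          ((b0 :: bt).map (fun row => row.getD c 0)) 0 ((0 : Int), false)).1) := by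
      rw [List.getElem?_map, hBc]; rfl
    rw [hBmap, hrange, List.map_map, List.getElem?_map, List.getElem?_range hc]
    simp only [Option.map_some, Function.comp_apply, Option.some.injEq]
    rw [hcol c, pvColFold_spec]
    by_cases hmem : (1 : Int) ∈ (b0 :: bt).map (fun row => row.getD c 0)
    · have hsome : (PySem.List.index? ((b0 :: bt).map (fun row => row.getD c 0)) (1 : Int)).isSome := by
        rw [PySem.List.index?_isSome_iff]; exact hmem
      obtain ⟨k, hk⟩ := Option.isSome_iff_exists.mp hsome
      rw [hk]
      simp
      intro h1 h2
      exfalso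
      rcases List.mem_map.mp hmem with ⟨row, hrm, hre⟩
      rw [List.getD_eq_getElem?_getD] at hre
      rcases List.mem_cons.mp hrm with h | h
      · subst h; exact h1 hre.symm
      · exact (h2 row h) hre
    · rw [(PySem.List.index?_eq_none_iff _ _).mpr hmem]
      simp
      intro h
      exfalso
      apply hmem
      by_cases hb : b0.getD c 0 = 1
      · exact List.mem_map.mpr ⟨b0, by simp, hb⟩
      · rw [List.getD_eq_getElem?_getD] at hb
        rcases h (fun he => hb he.symm) with ⟨a, ha, hae⟩
        refine List.mem_map.mpr ⟨a, by simp [ha], ?_⟩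
        rw [List.getD_eq_getElem?_getD]
        exact hae
  · have h1 : ((PySem.List.pyRange 0 ((b0.length : Nat) : Int) 1).map (fun c =>
        let col := (PySem.List.pyRange 0 (((b0 :: bt).length : Nat) : Int) 1).map (fun r =>
          PySem.List.pyGetD (PySem.List.pyGetD (b0 :: bt) r []) c 0)
        if ¬ ((1 : Int) ∈ col) then (0 : Int)
        else (((b0 :: bt).length : Nat) : Int) -
          (((PySem.List.index? col (1 : Int)).getD 0 : Nat) : Int)))[c]? = none := by
      rw [List.getElem?_eq_none]
      simp only [List.length_map]
      rw [hrange]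
      simpa using Nat.le_of_not_lt hc
    have h2 : (((PySem.List.enumerate (b0 :: bt) 0).foldl (pvStepRow (((b0 :: bt).length : Nat) : Int))
        (List.replicate b0.length ((0 : Int), false))).map (fun hf => hf.1))[c]? = none := by
      rw [List.getElem?_eq_none]
      rw [List.length_map, hlenB]
      exact Nat.le_of_not_lt hc
    rw [h1, h2]

-- ===== VERDICT (by name: the statement is the Claim_ definition above) =====
theorem get_min_height_spec : Claim_equal_get_min_height := by
  intro board _ hpre
  unfold Spec_get_min_height get_min_height get_min_height_alt
  simp only []
  rw [pv_heights_eq board hpre]
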